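-- pv_equiv track=rewrite | github.com/magnetic233/team16-031802431 | AI大比拼/ai.py | isOdd
-- ===== SOURCE A (Python) =====
-- def isOdd(digits):
--     num = 0
--     for i in range(9):
--         if digits[i] == 0:
--             continue
--         for j in range(i + 1, 9):
--             if digits[j] == 0:
--                 continue
--             if digits[i] > digits[j]:
--                 num += 1
--     return num % 2 == 1
-- ===== SOURCE B (Python) =====
-- def isOdd(digits):
--     vals = [digits[i] for i in range(9) if digits[i] != 0]
--
--     def sort_count(a):
--         if len(a) <= 1:
--             return a, 0
--         mid = len(a) // 2
--         left, inv_l = sort_count(a[:mid])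
--         right, inv_r = sort_count(a[mid:])
--         merged = []
--         i = j = inv = 0
--         while i < len(left) and j < len(right):
--             if left[i] <= right[j]:
--                 merged.append(left[i])
--                 i += 1
--             else:
--                 merged.append(right[j])
--                 j += 1
--                 inv += len(left) - i
--         merged.extend(left[i:])
--         merged.extend(right[j:])
--         return merged, inv_l + inv_r + inv
--
--     _, total = sort_count(vals)
--     return total % 2 == 1
-- ===== Notes on version B (the rewrite author's own statement) =====
-- stated objective: alternative
-- what changed: Replaces the nested index loops that compare all pairs among the first 9 entries with a filter of the nonzero entries followed by a recursive merge-sort inversion counter (ties taken from the left so equal values count no inversion), returning the parity of the count.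
import Mathlib
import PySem

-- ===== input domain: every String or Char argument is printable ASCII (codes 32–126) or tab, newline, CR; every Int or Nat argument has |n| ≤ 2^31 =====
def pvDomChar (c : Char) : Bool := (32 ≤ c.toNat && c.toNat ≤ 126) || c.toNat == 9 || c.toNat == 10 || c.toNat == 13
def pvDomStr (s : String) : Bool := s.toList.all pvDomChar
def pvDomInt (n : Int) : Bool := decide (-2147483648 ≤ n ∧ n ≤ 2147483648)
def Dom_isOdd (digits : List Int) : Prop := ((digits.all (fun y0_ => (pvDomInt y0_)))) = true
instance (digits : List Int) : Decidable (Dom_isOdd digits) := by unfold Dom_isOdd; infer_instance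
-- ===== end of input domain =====

-- B replaces the all-pairs double loop by a merge-sort inversion counter on the nonzero
-- entries of the 9-digit window (alternative algorithm; same result, no speed claim).

-- ===== PORT A =====
-- literal port of A: for i in range(9): skip zeros; for j in range(i+1,9): skip zeros; count digits[i] > digits[j]; return num % 2 == 1
def isOdd (digits : List Int) : Bool :=
  let num : Int := (PySem.List.pyRange 0 9 1).foldl (fun num i =>
    if PySem.List.pyGetD digits i 0 = 0 then num
    else (PySem.List.pyRange (i + 1) 9 1).foldl (fun num j =>
      if PySem.List.pyGetD digits j 0 = 0 then num
      else if PySem.List.pyGetD digits i 0 > PySem.List.pyGetD digits j 0 then num + 1 else num) num) 0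
  decide (PySem.Int.mod num 2 = 1)

-- ===== PORT B =====
-- merge of two runs, counting, on taking from the right, the elements still left on the left
def pvMergeB : List Int → List Int → List Int × Nat
  | [], r => (r, 0)
  | x :: l, [] => (x :: l, 0)
  | x :: l, y :: r =>
    if x ≤ y then
      let p := pvMergeB l (y :: r)
      (x :: p.1, p.2)
    else
      let p := pvMergeB (x :: l) r
      (y :: p.1, p.2 + (x :: l).length)
termination_by l r => l.length + r.length

-- sort_count of Source B: split at len//2, recurse, merge with count
def pvSortCount (a : List Int) : List Int × Nat :=
  if a.length ≤ 1 then (a, 0)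
  else
    let p1 := pvSortCount (a.take (a.length / 2))
    let p2 := pvSortCount (a.drop (a.length / 2))
    let p := pvMergeB p1.1 p2.1
    (p.1, p1.2 + p2.2 + p.2)
termination_by a.length
decreasing_by
  · simp only [List.length_take]; omega
  · simp only [List.length_drop]; omega

def isOdd_alt (digits : List Int) : Bool :=
  -- vals = [digits[i] for i in range(9) if digits[i] != 0]
  let vals := ((PySem.List.pyRange 0 9 1).map (fun i => PySem.List.pyGetD digits i 0)).filter
    (fun d => d != 0)
  decide ((pvSortCount vals).2 % 2 = 1)

-- ===== PRECONDITION & SPEC =====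
-- A indexes digits[0..8]; on shorter lists it raises IndexError, so those are excluded.
def Pre_isOdd (digits : List Int) : Prop := 9 ≤ digits.length
instance (digits : List Int) : Decidable (Pre_isOdd digits) := by unfold Pre_isOdd; infer_instance
def pvWitness_isOdd : List Int := [3, 1, 4, 1, 5, 9, 2, 6, 5]

def Spec_isOdd (digits : List Int) (out : Bool) : Prop := out = isOdd_alt digits
instance (digits : List Int) (out : Bool) : Decidable (Spec_isOdd digits out) := by unfold Spec_isOdd; infer_instance

-- ===== CLAIM (what is proved, stated in full; the proofs are below) =====
def Claim_equal_isOdd : Prop := ∀ (digits : List Int), Dom_isOdd digits → Pre_isOdd digits → Spec_isOdd digits (isOdd digits)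

-- ===== LEMMAS AND PROOFS =====

-- number of inverted pairs (i < j, a_i > a_j) of a list
def pvInv : List Int → Nat
  | [] => 0
  | x :: xs => xs.countP (fun y => decide (y < x)) + pvInv xs

-- inverted pairs across two lists: x from l, y from r, y < x
def pvCross (l r : List Int) : Nat := (l.map (fun x => r.countP (fun y => decide (y < x)))).sum

theorem pvCross_cons_left (x : Int) (l r : List Int) :
    pvCross (x :: l) r = r.countP (fun y => decide (y < x)) + pvCross l r := by
  simp [pvCross]

theorem pvCross_cons_right (l : List Int) (y : Int) (r : List Int) :
    pvCross l (y :: r) = l.countP (fun x => decide (y < x)) + pvCross l r := by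
  induction l with
  | nil => simp [pvCross]
  | cons a l ih =>
    simp only [pvCross_cons_left, List.countP_cons, ih]
    by_cases h : y < a <;> simp [h] <;> omega

theorem pvCross_perm_left {l l' : List Int} (r : List Int) (h : l.Perm l') :
    pvCross l r = pvCross l' r :=
  (h.map _).sum_eq

theorem pvCross_perm_right (l : List Int) {r r' : List Int} (h : r.Perm r') :
    pvCross l r = pvCross l r' := by
  unfold pvCross
  have : (fun x : Int => r.countP (fun y => decide (y < x)))
       = (fun x : Int => r'.countP (fun y => decide (y < x))) := by
    funext x; exact h.countP_eq _
  rw [this]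

theorem pvInv_append (l r : List Int) :
    pvInv (l ++ r) = pvInv l + pvInv r + pvCross l r := by
  induction l with
  | nil => simp [pvInv, pvCross]
  | cons x l ih =>
    simp only [List.cons_append, pvInv, List.countP_append, ih, pvCross_cons_left]
    omega

theorem pvMergeB_perm (l r : List Int) : (pvMergeB l r).1.Perm (l ++ r) := by
  fun_induction pvMergeB l r with
  | case1 r => simp
  | case2 x l => simp
  | case3 x l y r hxy p ih => exact ih.cons x
  | case4 x l y r hxy p ih =>
    exact ((ih.cons y).trans (List.perm_middle.symm.trans (by simp)))

theorem pvMergeB_sorted {l r : List Int} (hl : l.Pairwise (· ≤ ·)) (hr : r.Pairwise (· ≤ ·)) :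
    (pvMergeB l r).1.Pairwise (· ≤ ·) := by
  fun_induction pvMergeB l r with
  | case1 r => exact hr
  | case2 x l => exact hl
  | case3 x l y r hxy p ih =>
    rw [List.pairwise_cons] at hl
    refine List.pairwise_cons.2 ⟨?_, ih hl.2 hr⟩
    intro b hb
    have hb' : b ∈ l ++ y :: r := (pvMergeB_perm l (y :: r)).mem_iff.1 hb
    rcases List.mem_append.1 hb' with h | h
    · exact hl.1 b h
    · rcases List.mem_cons.1 h with rfl | h
      · exact hxy
      · exact le_trans hxy ((List.pairwise_cons.1 hr).1 b h)
  | case4 x l y r hxy p ih =>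
    rw [List.pairwise_cons] at hr
    refine List.pairwise_cons.2 ⟨?_, ih hl hr.2⟩
    intro b hb
    have hb' : b ∈ (x :: l) ++ r := (pvMergeB_perm (x :: l) r).mem_iff.1 hb
    rcases List.mem_append.1 hb' with h | h
    · rcases List.mem_cons.1 h with rfl | h
      · omega
      · have := (List.pairwise_cons.1 hl).1 b h; omega
    · exact hr.1 b h

theorem pvMergeB_count {l r : List Int} (hl : l.Pairwise (· ≤ ·)) (hr : r.Pairwise (· ≤ ·)) :
    (pvMergeB l r).2 = pvCross l r := by
  fun_induction pvMergeB l r with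
  | case1 r => simp [pvCross]
  | case2 x l =>
    simp only [pvCross]
    induction l <;> simp_all
  | case3 x l y r hxy p ih =>
    rw [List.pairwise_cons] at hl
    have h0 : (y :: r).countP (fun z => decide (z < x)) = 0 := by
      rw [List.countP_eq_zero]
      intro z hz
      rcases List.mem_cons.1 hz with rfl | hz
      · simp; omega
      · have := (List.pairwise_cons.1 hr).1 z hz; simp; omega
    show (pvMergeB l (y :: r)).2 = pvCross (x :: l) (y :: r)
    rw [pvCross_cons_left, h0, ih hl.2 hr]
    omega
  | case4 x l y r hxy p ih =>
    rw [List.pairwise_cons] at hr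
    have hlen : (x :: l).countP (fun z => decide (y < z)) = (x :: l).length := by
      rw [List.countP_eq_length]
      intro z hz
      rcases List.mem_cons.1 hz with rfl | hz
      · simp; omega
      · have := (List.pairwise_cons.1 hl).1 z hz; simp; omega
    show (pvMergeB (x :: l) r).2 + (x :: l).length = pvCross (x :: l) (y :: r)
    rw [pvCross_cons_right, ih hl hr.2, hlen]
    omega

theorem pvSortCount_spec (a : List Int) :
    (pvSortCount a).1.Perm a ∧ (pvSortCount a).1.Pairwise (· ≤ ·) ∧ (pvSortCount a).2 = pvInv a := by
  fun_induction pvSortCount a with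
  | case1 a h =>
    match a, h with
    | [], _ => simp [pvInv]
    | [x], _ => simp [pvInv]
  | case2 a h p1 p2 p ihT ihD =>
    obtain ⟨hp1, hs1, hc1⟩ := ihT
    obtain ⟨hp2, hs2, hc2⟩ := ihD
    have hperm : (pvMergeB p1.1 p2.1).1.Perm a := by
      refine (pvMergeB_perm p1.1 p2.1).trans ?_
      refine ((hp1.append hp2).trans ?_)
      rw [List.take_append_drop]
    refine ⟨hperm, pvMergeB_sorted hs1 hs2, ?_⟩
    have hcnt : (pvMergeB p1.1 p2.1).2 = pvCross (a.take (a.length / 2)) (a.drop (a.length / 2)) := by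
      rw [pvMergeB_count hs1 hs2, pvCross_perm_left _ hp1, pvCross_perm_right _ hp2]
    have hinv := pvInv_append (a.take (a.length / 2)) (a.drop (a.length / 2))
    rw [List.take_append_drop] at hinv
    show (pvSortCount (a.take (a.length / 2))).2 + (pvSortCount (a.drop (a.length / 2))).2
        + (pvMergeB (pvSortCount (a.take (a.length / 2))).1 (pvSortCount (a.drop (a.length / 2))).1).2 = pvInv a
    rw [hcnt, hc1, hc2, hinv]

-- A's inner loop counts the j ∈ [k, b) with digits[j] ≠ 0 and digits[j] < x
theorem pvInnerLoop (xs : List Int) (b : Nat) (hb : b ≤ xs.length) (x : Int) :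
    ∀ (n k : Nat) (acc : Int), b - k = n → k ≤ b →
      (PySem.List.pyRange (k : Int) (b : Int) 1).foldl
        (fun num j => if PySem.List.pyGetD xs j 0 = 0 then num
          else if x > PySem.List.pyGetD xs j 0 then num + 1 else num) acc
      = acc + (((xs.take b).drop k).countP (fun y => decide (y < x) && (y != 0)) : Int) := by
  intro n
  induction n with
  | zero =>
    intro k acc h1 h2
    have hk : k = b := by omega
    subst hk
    rw [PySem.List.pyRange_one_eq_nil (le_refl _)]
    rw [List.drop_eq_nil_of_le (by simp [List.length_take])]
    simp
  | succ n ihn =>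
    intro k acc h1 h2
    have hkb : k < b := by omega
    have hkx : k < xs.length := by omega
    have hkt : k < (xs.take b).length := by simp [List.length_take]; omega
    rw [PySem.List.pyRange_one_cons (by exact_mod_cast hkb), List.foldl_cons]
    have hcast : ((k : Int) + 1) = ((k + 1 : Nat) : Int) := by push_cast; ring
    rw [hcast, List.drop_eq_getElem_cons hkt, List.countP_cons,
      ihn (k + 1) _ (by omega) (by omega)]
    have hget : PySem.List.pyGetD xs (k : Int) 0 = xs[k] := by
      rw [PySem.List.pyGetD_natCast, List.getD_eq_getElem _ _ hkx]
    have htk : (xs.take b)[k]'hkt = xs[k] := List.getElem_take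
    rw [hget, htk]
    by_cases h0 : xs[k] = 0
    · simp [h0]
    · by_cases hlt : xs[k] < x
      · have hgt : x > xs[k] := hlt
        simp [h0, hlt]
        omega
      · have hgt : ¬ x > xs[k] := hlt
        simp [h0, hgt]

-- A's outer loop from index k accumulates the inversion count of the nonzero entries of xs.take b past k
theorem pvOuterLoop (xs : List Int) (b : Nat) (hb : b ≤ xs.length) :
    ∀ (n k : Nat) (acc : Int), b - k = n → k ≤ b →
      (PySem.List.pyRange (k : Int) (b : Int) 1).foldl
        (fun num i => if PySem.List.pyGetD xs i 0 = 0 then num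
          else (PySem.List.pyRange (i + 1) (b : Int) 1).foldl
            (fun num j => if PySem.List.pyGetD xs j 0 = 0 then num
              else if PySem.List.pyGetD xs i 0 > PySem.List.pyGetD xs j 0 then num + 1 else num) num) acc
      = acc + (pvInv (((xs.take b).drop k).filter (fun d => d != 0)) : Int) := by
  intro n
  induction n with
  | zero =>
    intro k acc h1 h2
    have hk : k = b := by omega
    subst hk
    rw [PySem.List.pyRange_one_eq_nil (le_refl _)]
    rw [List.drop_eq_nil_of_le (by simp [List.length_take])]
    simp [pvInv]
  | succ n ihn =>
    intro k acc h1 h2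
    have hkb : k < b := by omega
    have hkx : k < xs.length := by omega
    have hkt : k < (xs.take b).length := by simp [List.length_take]; omega
    rw [PySem.List.pyRange_one_cons (by exact_mod_cast hkb), List.foldl_cons]
    have hcast : ((k : Int) + 1) = ((k + 1 : Nat) : Int) := by push_cast; ring
    rw [hcast]
    have hget : PySem.List.pyGetD xs (k : Int) 0 = xs[k] := by
      rw [PySem.List.pyGetD_natCast, List.getD_eq_getElem _ _ hkx]
    have htk : (xs.take b)[k]'hkt = xs[k] := List.getElem_take
    rw [List.drop_eq_getElem_cons hkt, List.filter_cons, htk, hget]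
    by_cases h0 : xs[k] = 0
    · rw [ihn (k + 1) _ (by omega) (by omega)]
      simp [h0]
    · rw [if_neg h0]
      have hne : (xs[k] != 0) = true := by simp [h0]
      rw [hne, if_pos rfl,
        pvInnerLoop xs b hb (xs[k]) n (k + 1) acc (by omega) (by omega),
        ihn (k + 1) _ (by omega) (by omega),
        pvInv, List.countP_filter]
      push_cast
      ring

-- reading xs[k..b) by index is the prefix xs.take b past k
theorem pvWindowMap (xs : List Int) (b : Nat) (hb : b ≤ xs.length) :
    ∀ (n k : Nat), b - k = n → k ≤ b →
      (PySem.List.pyRange (k : Int) (b : Int) 1).map (fun i => PySem.List.pyGetD xs i 0)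
        = (xs.take b).drop k := by
  intro n
  induction n with
  | zero =>
    intro k h1 h2
    have hk : k = b := by omega
    subst hk
    rw [PySem.List.pyRange_one_eq_nil (le_refl _)]
    rw [List.drop_eq_nil_of_le (by simp [List.length_take])]
    rfl
  | succ n ihn =>
    intro k h1 h2
    have hkb : k < b := by omega
    have hkx : k < xs.length := by omega
    have hkt : k < (xs.take b).length := by simp [List.length_take]; omega
    rw [PySem.List.pyRange_one_cons (by exact_mod_cast hkb), List.map_cons]
    have hcast : ((k : Int) + 1) = ((k + 1 : Nat) : Int) := by push_cast; ring
    have hget : PySem.List.pyGetD xs (k : Int) 0 = xs[k] := by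
      rw [PySem.List.pyGetD_natCast, List.getD_eq_getElem _ _ hkx]
    have htk : (xs.take b)[k]'hkt = xs[k] := List.getElem_take
    rw [hcast, ihn (k + 1) (by omega) (by omega), List.drop_eq_getElem_cons hkt, htk, hget]

-- ===== VERDICT (by name: the statement is the Claim_ definition above) =====
theorem isOdd_spec : Claim_equal_isOdd := by
  intro digits _ hpre
  unfold Spec_isOdd
  have h9 : (9 : Nat) ≤ digits.length := hpre
  have H := pvOuterLoop digits 9 h9 9 0 0 rfl (by omega)
  simp only [Nat.cast_ofNat, Nat.cast_zero, List.drop_zero] at H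
  have Hv := pvWindowMap digits 9 h9 9 0 rfl (by omega)
  simp only [Nat.cast_ofNat, Nat.cast_zero, List.drop_zero] at Hv
  show isOdd digits = isOdd_alt digits
  unfold isOdd isOdd_alt
  dsimp only
  rw [H, Hv, (pvSortCount_spec _).2.2, PySem.Int.mod_eq_emod_of_pos (by omega), decide_eq_decide]
  omega
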